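-- pv_equiv track=rewrite | github.com/2nist/dawsheet | apps/capture/sheets_writer.py | upgrade_headers
-- ===== SOURCE A (Python) =====
-- from typing import List, Dict, Any, Optional, Callable
--
-- HEADERS: List[str] = [
--     'Bar','Beat','BeatAbs','Time_s','Timecode','Chord','Section','Dur_beats','Dur_s',
--     'Lyric','Lyric_conf','EventType','WordStart_s','WordEnd_s','SubIdx','Melisma',
--     'Chord_conf','Section_conf','Source','ProjectId','EventId'
-- ]
--
-- def upgrade_headers(existing: List[str]) -> List[str]:
--     """Return a header row upgraded to the final schema.
--     If EventType/Word* fields are missing, insert them immediately after Lyric_conf.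
--     Ensures final order and deduplicates.
--     """
--     if not existing:
--         return list(HEADERS)
--     # Normalize: map case-insensitive matches to canonical HEADERS names
--     canon_by_lower = {h.lower(): h for h in HEADERS}
--     normalized: List[str] = []
--     seen_set = set()
--     for h in existing:
--         canon = canon_by_lower.get(h.lower(), h)
--         if canon not in seen_set:
--             normalized.append(canon)
--             seen_set.add(canon)
--     existing = normalized
--     # Map existing headers for quick membership checks
--     seen = {h: True for h in existing}
--     need = ['EventType','WordStart_s','WordEnd_s','SubIdx','Melisma']
--     out = list(existing)
--     # Insert after Lyric_conf when any of the new fields are missing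
--     if not all(h in seen for h in need):
--         try:
--             idx_lc = out.index('Lyric_conf')
--             insert_at = idx_lc + 1
--         except ValueError:
--             # If Lyric_conf is missing, append at the end as fallback
--             insert_at = len(out)
--         for i, h in enumerate(need):
--             if h not in seen:
--                 out.insert(insert_at + i, h)
--                 seen[h] = True
--     # Now reorder to match final HEADERS where possible
--     ordered = [h for h in HEADERS if h in seen]
--     # Preserve any unknown trailing headers
--     tail = [h for h in out if h not in ordered]
--     return ordered + tail
-- ===== SOURCE B (Python) =====
-- from typing import List
--
-- HEADERS: List[str] = [
--     'Bar','Beat','BeatAbs','Time_s','Timecode','Chord','Section','Dur_beats','Dur_s',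
--     'Lyric','Lyric_conf','EventType','WordStart_s','WordEnd_s','SubIdx','Melisma',
--     'Chord_conf','Section_conf','Source','ProjectId','EventId'
-- ]
--
-- def upgrade_headers(existing: List[str]) -> List[str]:
--     """Upgraded header row: canonical schema order plus unknown tail.
--
--     Simpler: the positional insert-after-Lyric_conf in the original only ever
--     affects membership (inserted fields are schema members and get re-sorted),
--     so a set union with the required fields replaces the index/insert loop.
--     """
--     if not existing:
--         return list(HEADERS)
--     canon_by_lower = {h.lower(): h for h in HEADERS}
--     normalized: List[str] = []
--     present = set()
--     for h in existing:
--         canon = canon_by_lower.get(h.lower(), h)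
--         if canon not in present:
--             normalized.append(canon)
--             present.add(canon)
--     present |= {'EventType', 'WordStart_s', 'WordEnd_s', 'SubIdx', 'Melisma'}
--     schema = set(HEADERS)
--     return [h for h in HEADERS if h in present] + [h for h in normalized if h not in schema]
-- ===== Notes on version B (the rewrite author's own statement) =====
-- stated objective: simpler
-- what changed: The try/except index('Lyric_conf') + enumerate/list.insert block is deleted entirely: since inserted fields are HEADERS members that get re-sorted by the final HEADERS-order filter, only their membership matters, so B unions the required fields into the set of present names and builds the result from two comprehensions.
import Mathlib
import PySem

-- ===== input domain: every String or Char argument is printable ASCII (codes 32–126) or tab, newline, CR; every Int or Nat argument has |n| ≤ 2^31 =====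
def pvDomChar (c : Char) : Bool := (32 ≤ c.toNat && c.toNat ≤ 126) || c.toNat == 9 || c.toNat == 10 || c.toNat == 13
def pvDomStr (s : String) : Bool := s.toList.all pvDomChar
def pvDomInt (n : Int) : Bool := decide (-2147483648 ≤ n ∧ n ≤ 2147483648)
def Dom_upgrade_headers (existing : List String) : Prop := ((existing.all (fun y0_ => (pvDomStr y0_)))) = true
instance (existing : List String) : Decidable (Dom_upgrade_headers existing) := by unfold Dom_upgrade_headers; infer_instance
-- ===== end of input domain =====

-- B replaces A's positional insert-after-Lyric_conf loop (which only ever affects membership,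
-- since inserted fields are schema members and get re-sorted) by a set union with the needed
-- fields; objective: simpler. Same return value on every input.

-- module-level constant HEADERS
def pvHEADERS : List String :=
  ["Bar","Beat","BeatAbs","Time_s","Timecode","Chord","Section","Dur_beats","Dur_s",
   "Lyric","Lyric_conf","EventType","WordStart_s","WordEnd_s","SubIdx","Melisma",
   "Chord_conf","Section_conf","Source","ProjectId","EventId"]

-- ===== PORT A =====
def upgrade_headers (existing : List String) : List String :=
  if existing = [] then pvHEADERS else
  -- canon_by_lower = {h.lower(): h for h in HEADERS}
  let canon_by_lower : PySem.Dict String String :=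
    pvHEADERS.foldl (fun d h => d.insert (PySem.Str.lower h) h) PySem.Dict.empty
  -- normalized / seen_set accumulation loop
  let norm :=
    existing.foldl (fun (acc : List String × PySem.Set String) h =>
        let canon := canon_by_lower.getD (PySem.Str.lower h) h
        if PySem.Set.contains acc.2 canon then acc
        else (acc.1 ++ [canon], PySem.Set.add acc.2 canon))
      ([], PySem.Set.empty)
  let existing2 := norm.1
  -- seen = {h: True for h in existing}
  let seen : PySem.Dict String Bool :=
    existing2.foldl (fun d h => d.insert h true) PySem.Dict.empty
  let need : List String := ["EventType","WordStart_s","WordEnd_s","SubIdx","Melisma"]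
  let out := existing2
  -- insert-after-Lyric_conf block (mutates out and seen)
  let st : List String × PySem.Dict String Bool :=
    if !(need.all (fun h => seen.contains h)) then
      let insert_at : Int :=
        match PySem.List.index? out "Lyric_conf" with
        | some idx_lc => (idx_lc : Int) + 1
        | none => (out.length : Int)
      (PySem.List.enumerate need).foldl
        (fun (st : List String × PySem.Dict String Bool) p =>
          if !(st.2.contains p.2) then
            (PySem.List.insert st.1 (insert_at + p.1) p.2, st.2.insert p.2 true)
          else st)
        (out, seen)
    else (out, seen)
  let ordered := pvHEADERS.filter (fun h => st.2.contains h)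
  let tail := st.1.filter (fun h => !(ordered.contains h))
  ordered ++ tail

-- ===== PORT B =====
def upgrade_headers_alt (existing : List String) : List String :=
  if existing = [] then pvHEADERS else
  let canon_by_lower : PySem.Dict String String :=
    pvHEADERS.foldl (fun d h => d.insert (PySem.Str.lower h) h) PySem.Dict.empty
  let norm :=
    existing.foldl (fun (acc : List String × PySem.Set String) h =>
        let canon := canon_by_lower.getD (PySem.Str.lower h) h
        if PySem.Set.contains acc.2 canon then acc
        else (acc.1 ++ [canon], PySem.Set.add acc.2 canon))
      ([], PySem.Set.empty)
  let normalized := norm.1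
  -- present |= {'EventType','WordStart_s','WordEnd_s','SubIdx','Melisma'}
  let present : PySem.Set String :=
    PySem.Set.update norm.2 ["EventType","WordStart_s","WordEnd_s","SubIdx","Melisma"]
  let schema : PySem.Set String := PySem.Set.ofList pvHEADERS
  pvHEADERS.filter (fun h => present.contains h)
    ++ normalized.filter (fun h => !(schema.contains h))

-- ===== PRECONDITION & SPEC =====
def Spec_upgrade_headers (existing : List String) (out : List String) : Prop := out = upgrade_headers_alt existing
instance (existing : List String) (out : List String) : Decidable (Spec_upgrade_headers existing out) := by unfold Spec_upgrade_headers; infer_instance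

-- ===== CLAIM (what is proved, stated in full; the proofs are below) =====
def Claim_equal_upgrade_headers : Prop := ∀ (existing : List String), Dom_upgrade_headers existing → Spec_upgrade_headers existing (upgrade_headers existing)

-- ===== LEMMAS AND PROOFS =====

-- Python's list.insert clamps, so inserting an element the predicate rejects never changes a filter,
-- and membership in the result is membership in the old list or equality with the new element.
theorem filter_pyinsert {α : Type} (xs : List α) (i : Int) (v : α) (p : α → Bool) (h : p v = false) :
    (PySem.List.insert xs i v).filter p = xs.filter p := by
  simp only [PySem.List.insert, List.filter_append, List.filter_cons, h, Bool.false_eq_true, if_false]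
  rw [← List.filter_append, List.take_append_drop]

theorem mem_pyinsert {α : Type} (xs : List α) (i : Int) (v : α) (x : α) :
    x ∈ PySem.List.insert xs i v ↔ x = v ∨ x ∈ xs := by
  simp only [PySem.List.insert, List.mem_append, List.mem_cons]
  rw [or_left_comm, ← List.mem_append, List.take_append_drop]

-- The normalize loop keeps its list and its set components equal (a PySem.Set IS a dup-free list):
-- both are the fold of Set.add over the canonicalized input.
theorem norm_fold_eq (f : String → String) :
    ∀ (l : List String) (a : List String),
      l.foldl (fun (acc : List String × PySem.Set String) h =>
          if PySem.Set.contains acc.2 (f h) then acc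
          else (acc.1 ++ [f h], PySem.Set.add acc.2 (f h)))
        (a, a)
      = ((l.map f).foldl PySem.Set.add a, (l.map f).foldl PySem.Set.add a) := by
  intro l
  induction l with
  | nil => intro a; simp
  | cons h t ih =>
    intro a
    simp only [List.foldl_cons, List.map_cons]
    by_cases hc : PySem.Set.contains a (f h) = true
    · rw [if_pos hc]
      have hc' : a.contains (f h) = true := by simpa [PySem.Set.contains] using hc
      have ha : PySem.Set.add a (f h) = a := by simp [PySem.Set.add, List.contains_iff_mem.mp hc']
      rw [ha, ih a]
    · rw [if_neg hc]
      have hc' : ¬ a.contains (f h) = true := by simpa [PySem.Set.contains] using hc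
      have hm : f h ∉ a := fun hm => hc' (List.contains_iff_mem.mpr hm)
      have ha : PySem.Set.add a (f h) = a ++ [f h] := by simp [PySem.Set.add, hm]
      rw [ha, ← ih (a ++ [f h])]

-- membership in the `seen = {h: True for h in existing}` dict
theorem contains_seen_dict : ∀ (l : List String) (d : PySem.Dict String Bool) (x : String),
    (l.foldl (fun d h => d.insert h true) d).contains x = (d.contains x || l.contains x) := by
  intro l
  induction l with
  | nil => intro d x; simp
  | cons h t ih =>
    intro d x
    simp only [List.foldl_cons, ih, PySem.Dict.contains_insert, List.contains_cons]
    by_cases hx : (x == h) = true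
    · have : x = h := eq_of_beq hx
      simp [this]
    · simp [hx]

-- membership and contains over PySem.Set.update / ofList / List.filter, as Bool equations
theorem mem_set_update (s : PySem.Set String) (l : List String) (x : String) :
    x ∈ PySem.Set.update s l ↔ x ∈ s ∨ x ∈ l := by
  rw [PySem.Set.update_eq_append_filter]
  simp only [List.mem_append, List.mem_filter, PySem.Set.mem_ofList]
  constructor
  · rintro (h | ⟨h, _⟩)
    · exact Or.inl h
    · exact Or.inr h
  · rintro (h | h)
    · exact Or.inl h
    · by_cases hs : x ∈ s
      · exact Or.inl hs
      · refine Or.inr ⟨h, ?_⟩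
        simpa [PySem.Set.contains] using hs
  
theorem contains_set_update (s : PySem.Set String) (l : List String) (x : String) :
    (PySem.Set.update s l).contains x = (List.contains s x || List.contains l x) := by
  rw [Bool.eq_iff_iff]
  simp only [PySem.Set.contains, Bool.or_eq_true, List.contains_iff_mem]
  exact mem_set_update s l x

theorem contains_set_ofList (l : List String) (x : String) :
    (PySem.Set.ofList l).contains x = List.contains l x := by
  rw [Bool.eq_iff_iff]
  simp only [PySem.Set.contains, List.contains_iff_mem]
  exact PySem.Set.mem_ofList ..

theorem contains_filter (l : List String) (p : String → Bool) (x : String) :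
    (l.filter p).contains x = (l.contains x && p x) := by
  rw [Bool.eq_iff_iff]
  simp only [List.contains_iff_mem, Bool.and_eq_true, List.mem_filter]

-- the insert-after-Lyric_conf loop: its dict records exactly (old keys ∪ processed names) …
theorem inner_contains (ia : Int) :
    ∀ (ps : List (Int × String)) (out : List String) (seen : PySem.Dict String Bool) (x : String),
      ((ps.foldl (fun (st : List String × PySem.Dict String Bool) p =>
          if !(st.2.contains p.2) then
            (PySem.List.insert st.1 (ia + p.1) p.2, st.2.insert p.2 true)
          else st) (out, seen)).2).contains x
      = (seen.contains x || (ps.map Prod.snd).contains x) := by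
  intro ps
  induction ps with
  | nil => intro out seen x; simp
  | cons p t ih =>
    intro out seen x
    simp only [List.foldl_cons, List.map_cons, List.contains_cons]
    by_cases hc : seen.contains p.2 = true
    · rw [if_neg (by simp [hc])]
      rw [ih]
      by_cases hx : (x == p.2) = true
      · have : x = p.2 := eq_of_beq hx
        simp [this, hc]
      · simp [hx]
    · rw [if_pos (by simp [hc])]
      simp only [ih, PySem.Dict.contains_insert]
      by_cases hx : (x == p.2) = true <;> simp [hx]

-- … its list gains only names the filter predicate may reject wholesale …
theorem inner_filter (ia : Int) (q : String → Bool) :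
    ∀ (ps : List (Int × String)) (out : List String) (seen : PySem.Dict String Bool),
      (∀ p ∈ ps, q p.2 = false) →
      ((ps.foldl (fun (st : List String × PySem.Dict String Bool) p =>
          if !(st.2.contains p.2) then
            (PySem.List.insert st.1 (ia + p.1) p.2, st.2.insert p.2 true)
          else st) (out, seen)).1).filter q
      = out.filter q := by
  intro ps
  induction ps with
  | nil => intro out seen _; simp
  | cons p t ih =>
    intro out seen hq
    simp only [List.foldl_cons]
    by_cases hc : seen.contains p.2 = true
    · rw [if_neg (by simp [hc])]
      exact ih out seen (fun p hp => hq p (List.mem_cons_of_mem _ hp))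
    · rw [if_pos (by simp [hc])]
      rw [ih _ _ (fun p hp => hq p (List.mem_cons_of_mem _ hp))]
      exact filter_pyinsert _ _ _ _ (hq p (List.mem_cons_self ..))

-- … and every element of its list was already present or is one of the processed names.
theorem inner_mem (ia : Int) :
    ∀ (ps : List (Int × String)) (out : List String) (seen : PySem.Dict String Bool) (x : String),
      x ∈ (ps.foldl (fun (st : List String × PySem.Dict String Bool) p =>
          if !(st.2.contains p.2) then
            (PySem.List.insert st.1 (ia + p.1) p.2, st.2.insert p.2 true)
          else st) (out, seen)).1
      → x ∈ out ∨ x ∈ ps.map Prod.snd := by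
  intro ps
  induction ps with
  | nil => intro out seen x hx; exact Or.inl hx
  | cons p t ih =>
    intro out seen x hx
    simp only [List.foldl_cons] at hx
    simp only [List.map_cons, List.mem_cons]
    by_cases hc : seen.contains p.2 = true
    · rw [if_neg (by simp [hc])] at hx
      rcases ih _ _ _ hx with h | h
      · exact Or.inl h
      · exact Or.inr (Or.inr h)
    · rw [if_pos (by simp [hc])] at hx
      rcases ih _ _ _ hx with h | h
      · rcases (mem_pyinsert _ _ _ _).mp h with h | h
        · exact Or.inr (Or.inl h)
        · exact Or.inl h
      · exact Or.inr (Or.inr h)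

-- the non-empty case: both port bodies, proved equal
theorem key (existing : List String) :
    (let canon_by_lower : PySem.Dict String String :=
       pvHEADERS.foldl (fun d h => d.insert (PySem.Str.lower h) h) PySem.Dict.empty
     let norm :=
       existing.foldl (fun (acc : List String × PySem.Set String) h =>
           let canon := canon_by_lower.getD (PySem.Str.lower h) h
           if PySem.Set.contains acc.2 canon then acc
           else (acc.1 ++ [canon], PySem.Set.add acc.2 canon))
         ([], PySem.Set.empty)
     let existing2 := norm.1
     let seen : PySem.Dict String Bool :=
       existing2.foldl (fun d h => d.insert h true) PySem.Dict.empty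
     let need : List String := ["EventType","WordStart_s","WordEnd_s","SubIdx","Melisma"]
     let out := existing2
     let st : List String × PySem.Dict String Bool :=
       if !(need.all (fun h => seen.contains h)) then
         let insert_at : Int :=
           match PySem.List.index? out "Lyric_conf" with
           | some idx_lc => (idx_lc : Int) + 1
           | none => (out.length : Int)
         (PySem.List.enumerate need).foldl
           (fun (st : List String × PySem.Dict String Bool) p =>
             if !(st.2.contains p.2) then
               (PySem.List.insert st.1 (insert_at + p.1) p.2, st.2.insert p.2 true)
             else st)
           (out, seen)
       else (out, seen)
     let ordered := pvHEADERS.filter (fun h => st.2.contains h)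
     let tail := st.1.filter (fun h => !(ordered.contains h))
     ordered ++ tail)
    = (let canon_by_lower : PySem.Dict String String :=
         pvHEADERS.foldl (fun d h => d.insert (PySem.Str.lower h) h) PySem.Dict.empty
       let norm :=
         existing.foldl (fun (acc : List String × PySem.Set String) h =>
             let canon := canon_by_lower.getD (PySem.Str.lower h) h
             if PySem.Set.contains acc.2 canon then acc
             else (acc.1 ++ [canon], PySem.Set.add acc.2 canon))
           ([], PySem.Set.empty)
       let normalized := norm.1
       let present : PySem.Set String :=
         PySem.Set.update norm.2 ["EventType","WordStart_s","WordEnd_s","SubIdx","Melisma"]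
       let schema : PySem.Set String := PySem.Set.ofList pvHEADERS
       pvHEADERS.filter (fun h => present.contains h)
         ++ normalized.filter (fun h => !(schema.contains h))) := by
  dsimp only
  simp only [PySem.Set.empty]
  rw [norm_fold_eq (fun h =>
      (pvHEADERS.foldl (fun d h => d.insert (PySem.Str.lower h) h) PySem.Dict.empty).getD
        (PySem.Str.lower h) h) existing []]
  set R : List String := (existing.map (fun h =>
      (pvHEADERS.foldl (fun d h => d.insert (PySem.Str.lower h) h) PySem.Dict.empty).getD
        (PySem.Str.lower h) h)).foldl PySem.Set.add [] with hR
  set seen : PySem.Dict String Bool :=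
    R.foldl (fun d h => d.insert h true) PySem.Dict.empty with hseen
  have hseenc : ∀ x, seen.contains x = R.contains x := by
    intro x
    rw [hseen, contains_seen_dict]
    simp
  -- two closed facts about the literal lists
  have hneedH : ∀ x ∈ (["EventType","WordStart_s","WordEnd_s","SubIdx","Melisma"] : List String),
      pvHEADERS.contains x = true := by decide
  have hq : ∀ p ∈ PySem.List.enumerate
      (["EventType","WordStart_s","WordEnd_s","SubIdx","Melisma"] : List String),
      (!(pvHEADERS.contains p.2)) = false := by decide
  by_cases hall :
      ((["EventType","WordStart_s","WordEnd_s","SubIdx","Melisma"] : List String).all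
        (fun h => seen.contains h)) = true
  · -- all needed fields already present: the insert block is skipped
    simp only [hall, Bool.not_true, Bool.false_eq_true, if_false]
    have hpred : ∀ h, seen.contains h
        = (PySem.Set.update R ["EventType","WordStart_s","WordEnd_s","SubIdx","Melisma"]).contains h := by
      intro h
      rw [hseenc, contains_set_update]
      by_cases hn : List.contains (["EventType","WordStart_s","WordEnd_s","SubIdx","Melisma"] : List String) h = true
      · have hr : R.contains h = true := by
          have := List.all_eq_true.mp hall h (List.contains_iff_mem.mp hn)
          rwa [hseenc] at this
        rw [hn, hr]
        decide
      · simp only [Bool.not_eq_true] at hn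
        rw [hn]
        simp
    congr 1
    · exact List.filter_congr (fun h _ => hpred h)
    · apply List.filter_congr
      intro h hh
      rw [contains_filter, hseenc, List.contains_iff_mem.mpr hh, Bool.and_true, contains_set_ofList]
  · -- some needed field missing: the insert block runs
    simp only [Bool.not_eq_true] at hall
    simp only [hall, Bool.not_false, if_true]
    set ia : Int :=
      (match PySem.List.index? R "Lyric_conf" with
       | some idx_lc => (idx_lc : Int) + 1
       | none => (R.length : Int)) with hia
    have hsnd : (PySem.List.enumerate
        (["EventType","WordStart_s","WordEnd_s","SubIdx","Melisma"] : List String)).map Prod.snd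
        = ["EventType","WordStart_s","WordEnd_s","SubIdx","Melisma"] := PySem.List.map_snd_enumerate ..
    set st : List String × PySem.Dict String Bool :=
      (PySem.List.enumerate
        (["EventType","WordStart_s","WordEnd_s","SubIdx","Melisma"] : List String)).foldl
        (fun (st : List String × PySem.Dict String Bool) p =>
          if !(st.2.contains p.2) then
            (PySem.List.insert st.1 (ia + p.1) p.2, st.2.insert p.2 true)
          else st)
        (R, seen) with hst
    have hpred : ∀ h, st.2.contains h
        = (PySem.Set.update R ["EventType","WordStart_s","WordEnd_s","SubIdx","Melisma"]).contains h := by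
      intro h
      rw [hst, inner_contains, hsnd, hseenc, contains_set_update]
    have hmemst : ∀ h, h ∈ st.1 →
        h ∈ R ∨ h ∈ (["EventType","WordStart_s","WordEnd_s","SubIdx","Melisma"] : List String) := by
      intro h hh
      rw [hst] at hh
      rcases inner_mem ia _ _ _ _ hh with hm | hm
      · exact Or.inl hm
      · rw [hsnd] at hm
        exact Or.inr hm
    have step2 : st.1.filter (fun h => !(pvHEADERS.contains h))
        = R.filter (fun h => !(pvHEADERS.contains h)) := by
      rw [hst]
      exact inner_filter ia _ _ _ seen hq
    clear_value st
    clear hst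
    congr 1
    · exact List.filter_congr (fun h _ => hpred h)
    · have step1 : st.1.filter (fun h => !((pvHEADERS.filter (fun h => st.2.contains h)).contains h))
          = st.1.filter (fun h => !(pvHEADERS.contains h)) := by
        apply List.filter_congr
        intro h hh
        rcases hmemst h hh with hmem | hmem
        · rw [contains_filter, hpred h, contains_set_update,
              List.contains_iff_mem.mpr hmem, Bool.true_or, Bool.and_true]
        · rw [contains_filter, hpred h, contains_set_update, hneedH h hmem,
              List.contains_iff_mem.mpr hmem, Bool.or_true, Bool.and_true]
      have step3 : R.filter (fun h => !(pvHEADERS.contains h))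
          = R.filter (fun h => !((PySem.Set.ofList pvHEADERS).contains h)) := by
        apply List.filter_congr
        intro h _
        rw [contains_set_ofList]
      rw [step1, step2, step3]

-- ===== VERDICT (by name: the statement is the Claim_ definition above) =====
set_option maxHeartbeats 1000000 in
theorem upgrade_headers_spec : Claim_equal_upgrade_headers := by
  intro existing _
  unfold Spec_upgrade_headers
  by_cases he : existing = []
  · subst he
    rfl
  · show upgrade_headers existing = upgrade_headers_alt existing
    unfold upgrade_headers upgrade_headers_alt
    rw [if_neg he, if_neg he]
    exact key existing
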